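-- pv_equiv track=rewrite | github.com/JanKubiena/pp1 | 13-Test3/p7.py | m3
-- ===== SOURCE A (Python) =====
-- def m3(n):
--     string = str(n)
--     numbers = ["0","1","2","3","4","5","6","7","8","9"]
--     result = ""
--     counter = 0
--
--     for i in range(len(string)):
--         for j in range(len(numbers)):
--             if string[i] == numbers[j - counter]:
--                 numbers.pop(j - counter)
--                 counter += 1
--                 break
--             else:
--                 continue
--
--     for j in range(len(numbers)):
--             result += numbers[j]
--
--     return result
-- ===== SOURCE B (Python) =====
-- def m3(n):
--     s = str(n)
--     return "".join(d for d in "0123456789" if d not in s)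
-- ===== Notes on version B (the rewrite author's own statement) =====
-- stated objective: simpler
-- what changed: B scans the fixed alphabet '0123456789' once with a membership test per digit and joins the survivors, instead of A's per-input-character inner scan over a mutated candidate list indexed by j - counter (with list pops and negative indexing).
import Mathlib
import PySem

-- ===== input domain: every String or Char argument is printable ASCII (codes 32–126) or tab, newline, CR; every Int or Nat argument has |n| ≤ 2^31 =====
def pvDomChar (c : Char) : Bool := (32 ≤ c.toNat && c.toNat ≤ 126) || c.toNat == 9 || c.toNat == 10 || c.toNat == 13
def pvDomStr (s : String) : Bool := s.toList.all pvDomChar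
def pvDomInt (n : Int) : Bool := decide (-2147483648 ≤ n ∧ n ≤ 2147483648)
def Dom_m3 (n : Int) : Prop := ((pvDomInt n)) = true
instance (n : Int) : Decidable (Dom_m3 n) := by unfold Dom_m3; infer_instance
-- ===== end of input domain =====

-- B rewrites A's per-character scan over a mutated candidate list as a single filter of the
-- fixed digit alphabet by membership in str(n); objective: simpler.

-- ===== PORT A =====
-- numbers = ["0",...,"9"] as a list of characters
def pyDigits : List Char := ['0', '1', '2', '3', '4', '5', '6', '7', '8', '9']

-- inner loop 'for j in range(len(numbers)): ...' ; `none` = the IndexError Python raises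
-- when numbers[j - counter] is out of range; numbers/counter are only updated on the break.
def m3Inner (ch : Char) (numbers : List Char) (counter : Int) : List Nat → Option (List Char × Int)
  | [] => some (numbers, counter)
  | j :: js =>
    match PySem.List.pyGet? numbers ((j : Int) - counter) with
    | none => none
    | some d =>
      if ch = d then
        match PySem.List.pop? numbers ((j : Int) - counter) with
        | none => none
        | some (_, rest) => some (rest, counter + 1)
      else m3Inner ch numbers counter js

-- outer loop 'for i in range(len(string)):' iterating the characters of string
def m3Outer : List Char → List Char → Int → Option (List Char × Int)
  | [], numbers, counter => some (numbers, counter)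
  | ch :: cs, numbers, counter =>
    match m3Inner ch numbers counter (List.range numbers.length) with
    | none => none
    | some (numbers', counter') => m3Outer cs numbers' counter'

def m3 (n : Int) : String :=
  let string := (PySem.Int.toStr n).toList
  match m3Outer string pyDigits 0 with
  | none => ""   -- unreachable under Pre_m3: Python raises IndexError here
  | some (numbers, _) =>
      -- 'for j in range(len(numbers)): result += numbers[j]' (result kept as List Char)
      String.ofList (numbers.foldl (fun r d => r ++ [d]) [])

-- ===== PORT B =====
-- ''.join(d for d in '0123456789' if d not in s)  ('0123456789' written as its character list)
def m3_alt (n : Int) : String :=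
  let s := PySem.Int.toStr n
  String.ofList ((['0', '1', '2', '3', '4', '5', '6', '7', '8', '9']).filter
    (fun d => !(s.toList.contains d)))

-- ===== PRECONDITION & SPEC =====
-- Pre_m3 excludes exactly the inputs on which A raises IndexError: those whose decimal string
-- contains a character coming after more than five already-removed distinct digits (i.e. all but
-- the last character already contain more than five distinct digits), where the index
-- j - counter in numbers[j - counter] falls below -len(numbers) and Python raises.
def Pre_m3 (n : Int) : Prop :=
  ((['0', '1', '2', '3', '4', '5', '6', '7', '8', '9'] : List Char).filter
    (fun d => decide (d ∈ (PySem.Int.toStr n).toList.dropLast))).length ≤ 5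
instance (n : Int) : Decidable (Pre_m3 n) := by unfold Pre_m3; infer_instance
def pvWitness_m3 : Int := 123456

def Spec_m3 (n : Int) (out : String) : Prop := out = m3_alt n
instance (n : Int) (out : String) : Decidable (Spec_m3 n out) := by unfold Spec_m3; infer_instance

-- ===== CLAIM (what is proved, stated in full; the proofs are below) =====
def Claim_equal_m3 : Prop := ∀ (n : Int), Dom_m3 n → Pre_m3 n → Spec_m3 n (m3 n)

-- ===== LEMMAS AND PROOFS =====

-- the position in `numbers` that Python's index j - counter denotes (negative indices wrap)
def m3Pos (k c j : Nat) : Nat := if j < c then k - c + j else j - c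

lemma m3Pos_lt (k c j : Nat) (hj : j < k) (hc : c ≤ k) : m3Pos k c j < k := by
  unfold m3Pos; split_ifs <;> omega

lemma m3Pos_inj (k c : Nat) {j j' : Nat} (hj : j < k) (hj' : j' < k) (hc : c ≤ k)
    (h : m3Pos k c j = m3Pos k c j') : j = j' := by
  unfold m3Pos at h; split_ifs at h <;> omega

lemma pyIdx_window (k c j : Nat) (hj : j < k) (hc : c ≤ k) :
    PySem.List.pyIdx? k ((j : Int) - (c : Int)) = some (m3Pos k c j) := by
  unfold PySem.List.pyIdx? m3Pos
  split_ifs with h1 h2 h3 h4 h5 <;> try omega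
  · congr 1; omega
  · congr 1; omega

lemma pyGet_window (numbers : List Char) (c j : Nat) (hj : j < numbers.length)
    (hc : c ≤ numbers.length) :
    PySem.List.pyGet? numbers ((j : Int) - (c : Int)) =
      some (numbers[m3Pos numbers.length c j]'(m3Pos_lt _ _ _ hj hc)) := by
  unfold PySem.List.pyGet?
  rw [pyIdx_window _ _ _ hj hc]
  simp [List.getElem?_eq_getElem (m3Pos_lt _ _ _ hj hc)]

lemma pop_window (numbers : List Char) (c j : Nat) (hj : j < numbers.length)
    (hc : c ≤ numbers.length) :
    PySem.List.pop? numbers ((j : Int) - (c : Int)) =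
      some (numbers[m3Pos numbers.length c j]'(m3Pos_lt _ _ _ hj hc),
            numbers.eraseIdx (m3Pos numbers.length c j)) := by
  unfold PySem.List.pop?
  rw [pyIdx_window _ _ _ hj hc]
  simp [List.getElem?_eq_getElem (m3Pos_lt _ _ _ hj hc)]

lemma eraseIdx_eq_filter_ne {ch : Char} :
    ∀ (l : List Char) (p : Nat), l.Nodup → (hp : p < l.length) → l[p] = ch →
      l.eraseIdx p = l.filter (fun x => x != ch)
  | a :: t, 0, hnd, hp, hc => by
    have hac : a = ch := by simpa using hc
    subst hac
    rw [show (a :: t).eraseIdx 0 = t from rfl, List.filter_cons]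
    rw [show (a != a) = false from by simp, if_neg (by simp)]
    refine (List.filter_eq_self.2 ?_).symm
    intro x hx
    simp only [bne_iff_ne, ne_eq]
    exact fun h => (List.nodup_cons.1 hnd).1 (h ▸ hx)
  | a :: t, p + 1, hnd, hp, hc => by
    simp only [List.eraseIdx_cons_succ, List.filter_cons]
    have ha : (a != ch) = true := by
      simp only [bne_iff_ne, ne_eq]
      intro h
      exact (List.nodup_cons.1 hnd).1 (h ▸ hc ▸ List.getElem_mem _)
    rw [ha, eraseIdx_eq_filter_ne t p (List.nodup_cons.1 hnd).2 (by simpa using hp) (by simpa using hc),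
      if_pos rfl]

lemma inner_no_match (ch : Char) (numbers : List Char) (counter : Int) (js : List Nat)
    (h : ∀ j ∈ js, ∃ d, PySem.List.pyGet? numbers ((j : Int) - counter) = some d ∧ ch ≠ d) :
    m3Inner ch numbers counter js = some (numbers, counter) := by
  induction js with
  | nil => rfl
  | cons j js ih =>
    obtain ⟨d, hd, hne⟩ := h j (by simp)
    simp only [m3Inner, hd, if_neg hne]
    exact ih (fun j' hj' => h j' (by simp [hj']))

lemma inner_match (ch : Char) (numbers rest : List Char) (counter : Int)
    (js₁ : List Nat) (j : Nat) (js₂ : List Nat)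
    (h1 : ∀ j' ∈ js₁, ∃ d, PySem.List.pyGet? numbers ((j' : Int) - counter) = some d ∧ ch ≠ d)
    (h2 : PySem.List.pyGet? numbers ((j : Int) - counter) = some ch)
    (h3 : PySem.List.pop? numbers ((j : Int) - counter) = some (ch, rest)) :
    m3Inner ch numbers counter (js₁ ++ j :: js₂) = some (rest, counter + 1) := by
  induction js₁ with
  | nil => simp [m3Inner, h2, h3]
  | cons j' js₁ ih =>
    obtain ⟨d, hd, hne⟩ := h1 j' (by simp)
    simp only [List.cons_append, m3Inner, hd, if_neg hne]
    exact ih (fun x hx => h1 x (by simp [hx]))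

lemma inner_spec (numbers : List Char) (ch : Char) (c : Nat)
    (hnd : numbers.Nodup) (hc : c ≤ numbers.length) :
    m3Inner ch numbers (c : Int) (List.range numbers.length) =
      if ch ∈ numbers then some (numbers.filter (fun x => x != ch), (c : Int) + 1)
      else some (numbers, (c : Int)) := by
  set k := numbers.length with hk
  by_cases hmem : ch ∈ numbers
  · obtain ⟨p, hp, hcp⟩ := List.getElem_of_mem hmem
    -- j* is the loop index at which numbers[j - counter] hits position p
    set j : Nat := if p < k - c then p + c else p - (k - c) with hj
    have hjk : j < k := by rw [hj]; split_ifs <;> omega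
    have hpos : m3Pos k c j = p := by rw [hj]; unfold m3Pos; split_ifs <;> omega
    have hsplit : List.range k = List.range j ++ j :: (List.range (k - j - 1)).map (fun t => j + 1 + t) := by
      have h1 : k = j + 1 + (k - j - 1) := by omega
      conv_lhs => rw [h1]
      rw [List.range_add, List.range_succ]
      simp [List.append_assoc]
    rw [if_pos hmem, hsplit]
    apply inner_match
    · intro j' hj'
      have hj'j : j' < j := List.mem_range.1 hj'
      refine ⟨numbers[m3Pos k c j']'(m3Pos_lt _ _ _ (by omega) hc), pyGet_window _ _ _ (by omega) hc, ?_⟩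
      intro heq
      have : m3Pos k c j' = p := by
        have := hnd.getElem_inj_iff (hi := m3Pos_lt _ _ _ (show j' < k by omega) hc) (hj := hp)
        exact this.1 (by rw [← heq, hcp])
      exact absurd (m3Pos_inj k c (by omega) hjk hc (this.trans hpos.symm)) (by omega)
    · rw [pyGet_window _ _ _ hjk hc]
      congr 1
      simp only [← hk, hpos, hcp]
    · rw [pop_window _ _ _ hjk hc]
      congr 1
      simp only [← hk, hpos, hcp, eraseIdx_eq_filter_ne numbers p hnd hp hcp]
  · rw [if_neg hmem]
    apply inner_no_match
    intro j hjmem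
    have hjk : j < k := List.mem_range.1 hjmem
    refine ⟨numbers[m3Pos k c j]'(m3Pos_lt _ _ _ hjk hc), pyGet_window _ _ _ hjk hc, ?_⟩
    intro heq
    exact hmem (heq ▸ List.getElem_mem _)

lemma pyDigits_nodup : pyDigits.Nodup := by decide

lemma outer_spec : ∀ (cs seen : List Char),
    (cs ≠ [] → ((pyDigits.filter (fun d => decide (d ∈ seen ++ cs.dropLast))).length ≤ 5)) →
    m3Outer cs (pyDigits.filter (fun d => !decide (d ∈ seen)))
      (10 - ((pyDigits.filter (fun d => !decide (d ∈ seen))).length : Int)) =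
    some (pyDigits.filter (fun d => !decide (d ∈ seen ++ cs)),
      10 - ((pyDigits.filter (fun d => !decide (d ∈ seen ++ cs))).length : Int)) := by
  intro cs
  induction cs with
  | nil => intro seen _; simp [m3Outer]
  | cons ch cs ih =>
    intro seen hpre
    set numbers := pyDigits.filter (fun d => !decide (d ∈ seen)) with hnum
    set k := numbers.length with hk
    have hnd : numbers.Nodup := pyDigits_nodup.filter _
    have hklen : k = (pyDigits.filter (fun d => !decide (d ∈ seen))).length := by
      rw [hk, hnum]
    have hk10 : k ≤ 10 := by
      have := List.length_filter_le (fun d => !decide (d ∈ seen)) pyDigits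
      have h10 : pyDigits.length = 10 := rfl
      omega
    have hseen5 : (pyDigits.filter (fun d => decide (d ∈ seen))).length ≤ 5 := by
      refine le_trans (List.Sublist.length_le (List.monotone_filter_right pyDigits ?_)) (hpre (by simp))
      intro d hd
      simp only [decide_eq_true_eq] at hd ⊢
      exact List.mem_append_left _ hd
    have h5k : 5 ≤ k := by
      have := List.length_eq_length_filter_add (l := pyDigits) (fun d => decide (d ∈ seen))
      have h10 : pyDigits.length = 10 := rfl
      omega
    have hcast : (10 : Int) - (k : Int) = ((10 - k : Nat) : Int) := by omega
    have hck : 10 - k ≤ k := by omega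
    by_cases hmem : ch ∈ numbers
    · have hinner : m3Inner ch numbers (10 - (k : Int)) (List.range numbers.length) =
          some (numbers.filter (fun x => x != ch), ((10 - k : Nat) : Int) + 1) := by
        rw [hcast, ← hk, inner_spec numbers ch (10 - k) hnd hck, if_pos hmem]
      have hE : numbers.filter (fun x => x != ch) =
          pyDigits.filter (fun d => !decide (d ∈ seen ++ [ch])) := by
        rw [hnum, List.filter_filter]
        apply List.filter_congr
        intro d _
        by_cases hds : d ∈ seen <;> by_cases hdc : d = ch <;> simp [hds, hdc]
      have hlen : (pyDigits.filter (fun d => !decide (d ∈ seen ++ [ch]))).length = k - 1 := by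
        rw [← hE, ← hnd.erase_eq_filter ch, List.length_erase_of_mem hmem]
      have hmem1 : 1 ≤ k := by
        have := List.length_pos_of_mem hmem
        omega
      have hcast2 : ((10 - k : Nat) : Int) + 1 =
          10 - ((pyDigits.filter (fun d => !decide (d ∈ seen ++ [ch]))).length : Int) := by
        rw [hlen]
        omega
      simp only [m3Outer, hinner]
      rw [hE, hcast2, ih (seen ++ [ch]) ?_]
      · have hl : (seen ++ [ch]) ++ cs = seen ++ ch :: cs := by simp
        rw [hl]
      · intro hne
        have hdl : (seen ++ [ch]) ++ cs.dropLast = seen ++ (ch :: cs).dropLast := by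
          cases cs with
          | nil => exact absurd rfl hne
          | cons e cs' => simp
        rw [hdl]
        exact hpre (by simp)
    · have hinner : m3Inner ch numbers (10 - (k : Int)) (List.range numbers.length) =
          some (numbers, ((10 - k : Nat) : Int)) := by
        rw [hcast, ← hk, inner_spec numbers ch (10 - k) hnd hck, if_neg hmem]
      have hE : numbers = pyDigits.filter (fun d => !decide (d ∈ seen ++ [ch])) := by
        rw [hnum]
        apply List.filter_congr
        intro d hd
        have hch : ¬(d = ch ∧ d ∉ seen) := by
          rintro ⟨h1, h2⟩
          exact hmem (by rw [hnum, List.mem_filter]; exact ⟨h1 ▸ hd, by simpa using h1 ▸ h2⟩)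
        by_cases hds : d ∈ seen
        · simp [hds]
        · have hdc : d ≠ ch := fun h => hch ⟨h, hds⟩
          simp [hds, hdc]
      have hlen : (pyDigits.filter (fun d => !decide (d ∈ seen ++ [ch]))).length = k := by
        rw [← hE]
      have hcast3 : ((10 - k : Nat) : Int) =
          10 - ((pyDigits.filter (fun d => !decide (d ∈ seen ++ [ch]))).length : Int) := by
        rw [hlen]
        omega
      simp only [m3Outer, hinner]
      rw [hE, hcast3, ih (seen ++ [ch]) ?_]
      · have hl : (seen ++ [ch]) ++ cs = seen ++ ch :: cs := by simp
        rw [hl]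
      · intro hne
        have hdl : (seen ++ [ch]) ++ cs.dropLast = seen ++ (ch :: cs).dropLast := by
          cases cs with
          | nil => exact absurd rfl hne
          | cons e cs' => simp
        rw [hdl]
        exact hpre (by simp)

-- ===== VERDICT (by name: the statement is the Claim_ definition above) =====
theorem m3_spec : Claim_equal_m3 := by
  intro n _ hpre
  have hpre' : ((PySem.Int.toStr n).toList ≠ [] →
      (pyDigits.filter (fun d => decide (d ∈ ([] : List Char) ++ (PySem.Int.toStr n).toList.dropLast))).length ≤ 5) := by
    intro _
    unfold Pre_m3 at hpre
    simpa [pyDigits] using hpre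
  have hout := outer_spec (PySem.Int.toStr n).toList [] hpre'
  have h0 : pyDigits.filter (fun d => !decide (d ∈ ([] : List Char))) = pyDigits := by decide
  rw [h0] at hout
  have hc0 : (10 : Int) - (pyDigits.length : Int) = 0 := by decide
  rw [hc0] at hout
  simp only [List.nil_append] at hout
  simp only [Spec_m3, m3, m3_alt, hout]
  rw [PySem.List.foldl_append_singleton_eq_self]
  simp only [List.nil_append]
  congr 1
  apply List.filter_congr
  intro d _
  simp [List.contains_eq_mem]
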